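-- pv_equiv track=rewrite | github.com/MarkJoson/mcts_numba_cuda | src/puct/plot_puct_v3_duct_warp_paths.py | _candidate_pairs
-- ===== SOURCE A (Python) =====
-- def _candidate_pairs(actions: int):
--     pairs = []
--     for a0 in range(actions):
--         for a1 in range(actions):
--             if a0 == 0 and a1 == 0:
--                 continue
--             pairs.append((a0, a1))
--     return pairs
-- ===== SOURCE B (Python) =====
-- def _candidate_pairs(actions: int):
--     if actions <= 0:
--         return []
--     return [divmod(i, actions) for i in range(1, actions * actions)]
-- ===== Notes on version B (the rewrite author's own statement) =====
-- stated objective: alternative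
-- what changed: Replaces the nested row/column loops and the (0,0) skip-test with a single flat scan over indices 1..actions^2-1, reconstructing each pair by divmod.
import Mathlib
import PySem

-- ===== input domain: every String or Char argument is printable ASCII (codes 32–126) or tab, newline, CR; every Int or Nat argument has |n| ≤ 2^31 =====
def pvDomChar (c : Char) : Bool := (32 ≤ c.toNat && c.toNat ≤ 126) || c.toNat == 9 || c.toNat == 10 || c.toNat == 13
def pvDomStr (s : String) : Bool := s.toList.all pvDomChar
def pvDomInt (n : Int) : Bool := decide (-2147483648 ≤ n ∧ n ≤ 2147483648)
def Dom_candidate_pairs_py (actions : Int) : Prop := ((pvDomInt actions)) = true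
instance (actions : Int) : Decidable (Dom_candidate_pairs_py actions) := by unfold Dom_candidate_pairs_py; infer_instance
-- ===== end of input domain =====

-- B replaces the nested loops with one flat scan over indices 1..n^2-1 decoded by divmod (alternative decomposition, same cost).


-- ===== PORT A =====
def candidate_pairs_py (actions : Int) : List (Int × Int) :=
  (PySem.List.pyRange 0 actions 1).foldl (fun pairs a0 =>
    (PySem.List.pyRange 0 actions 1).foldl (fun pairs a1 =>
      if a0 = 0 ∧ a1 = 0 then pairs else pairs ++ [(a0, a1)]) pairs) []

-- ===== PORT B =====
def candidate_pairs_py_alt (actions : Int) : List (Int × Int) :=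
  if actions ≤ 0 then []
  else (PySem.List.pyRange 1 (actions * actions) 1).map
    (fun i => (PySem.Int.floordiv i actions, PySem.Int.mod i actions))

-- ===== PRECONDITION & SPEC =====
def Spec_candidate_pairs_py (actions : Int) (out : List (Int × Int)) : Prop := out = candidate_pairs_py_alt actions
instance (actions : Int) (out : List (Int × Int)) : Decidable (Spec_candidate_pairs_py actions out) := by unfold Spec_candidate_pairs_py; infer_instance

-- ===== CLAIM (what is proved, stated in full; the proofs are below) =====
def Claim_equal_candidate_pairs_py : Prop := ∀ (actions : Int), Dom_candidate_pairs_py actions → Spec_candidate_pairs_py actions (candidate_pairs_py actions)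

-- ===== LEMMAS AND PROOFS =====

-- inner loop of A: append the (filtered) row to the accumulator
theorem inner_foldl (a0 : Int) (l : List Int) (init : List (Int × Int)) :
    l.foldl (fun pairs a1 => if a0 = 0 ∧ a1 = 0 then pairs else pairs ++ [(a0, a1)]) init
      = init ++ (l.filter (fun a1 => !(decide (a0 = 0) && decide (a1 = 0)))).map (fun a1 => (a0, a1)) := by
  induction l generalizing init with
  | nil => simp
  | cons x xs ih =>
    simp only [List.foldl_cons, List.filter_cons]
    by_cases h : a0 = 0 ∧ x = 0
    · have hb : (!(decide (a0 = 0) && decide (x = 0))) = false := by simp [h.1, h.2]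
      rw [if_pos h, hb, ih]
      simp
    · have hb : (!(decide (a0 = 0) && decide (x = 0))) = true := by
        simp only [Bool.not_and, Bool.or_eq_true, Bool.not_eq_true', decide_eq_false_iff_not]
        tauto
      rw [if_neg h, hb, ih]
      simp

-- both loops of A at once: a flatMap of filtered rows
theorem nested_foldl (l0 l1 : List Int) (init : List (Int × Int)) :
    l0.foldl (fun pairs a0 =>
        l1.foldl (fun pairs a1 => if a0 = 0 ∧ a1 = 0 then pairs else pairs ++ [(a0, a1)]) pairs) init
      = init ++ l0.flatMap (fun a0 =>
          (l1.filter (fun a1 => !(decide (a0 = 0) && decide (a1 = 0)))).map (fun a1 => (a0, a1))) := by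
  induction l0 generalizing init with
  | nil => simp
  | cons x xs ih =>
    rw [List.foldl_cons, inner_foldl, ih, List.flatMap_cons, List.append_assoc]

theorem flatMap_congr_mem {α β : Type} (l : List α) (f g : α → List β)
    (h : ∀ a ∈ l, f a = g a) : l.flatMap f = l.flatMap g := by
  induction l with
  | nil => rfl
  | cons x xs ih =>
    rw [List.flatMap_cons, List.flatMap_cons, h x (by simp),
        ih (fun a ha => h a (by simp [ha]))]

-- the row a0 = 0: the filter drops exactly the head (0,0)-candidate
theorem row_zero (n : Int) :
    ((0 :: PySem.List.pyRange 1 n 1).filter (fun a1 => !decide (a1 = 0)))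
      = PySem.List.pyRange 1 n 1 := by
  simp only [List.filter_cons, decide_true, Bool.not_true, Bool.false_eq_true, if_false]
  apply List.filter_eq_self.mpr
  intro x hx
  have hx0 : x ≠ 0 := by
    have := (PySem.List.mem_pyRange_one).mp hx
    omega
  simp [hx0]

-- rows with a0 ≠ 0: the filter keeps everything
theorem row_pos (n : Int) :
    ∀ a0 ∈ PySem.List.pyRange 1 n 1,
      ((0 :: PySem.List.pyRange 1 n 1).filter
          (fun a1 => !(decide (a0 = 0) && decide (a1 = 0)))).map (fun a1 => (a0, a1))
        = (0 :: PySem.List.pyRange 1 n 1).map (fun a1 => (a0, a1)) := by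
  intro a0 ha0
  have h0 : a0 ≠ 0 := by
    have := (PySem.List.mem_pyRange_one).mp ha0
    omega
  congr 1
  apply List.filter_eq_self.mpr
  intro x _
  simp [h0]

-- one block of B's flat range decodes to one row of pairs
theorem block_map (n a : Int) (hn : 0 < n) :
    (PySem.List.pyRange (a * n) (a * n + n) 1).map
        (fun i => (PySem.Int.floordiv i n, PySem.Int.mod i n))
      = (PySem.List.pyRange 0 n 1).map (fun a1 => (a, a1)) := by
  rw [PySem.List.pyRange_one (a := a * n), PySem.List.pyRange_one (a := 0)]
  have h1 : (a * n + n - a * n).toNat = (n - 0).toNat := by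
    have : a * n + n - a * n = n - 0 := by omega
    rw [this]
  rw [h1]
  simp only [List.map_map]
  apply List.map_congr_left
  intro k hk
  have hkn : (k : Int) < n := by
    rw [List.mem_range] at hk
    omega
  have hk0 : (0 : Int) ≤ (k : Int) := Int.natCast_nonneg k
  simp only [Function.comp]
  rw [Prod.mk.injEq]
  refine ⟨?_, ?_⟩
  · rw [PySem.Int.floordiv_eq_ediv_of_pos hn]
    have h2 : a * n + (k : Int) = (k : Int) + a * n := by ring
    rw [h2, Int.add_mul_ediv_right _ _ (by omega : n ≠ 0),
        Int.ediv_eq_zero_of_lt hk0 hkn]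
    omega
  · rw [PySem.Int.mod_eq_emod_of_pos hn]
    have h3 : (a * n + (k : Int)) % n = (k : Int) % n := by
      rw [show a * n + (k : Int) = (k : Int) + n * a by ring]
      exact Int.add_mul_emod_self_left (k : Int) n a
    rw [h3, Int.emod_eq_of_lt hk0 hkn]
    omega

-- k consecutive blocks decode to k rows
theorem rows_map (n : Int) (hn : 0 < n) :
    ∀ (k : Nat) (a : Int), 1 ≤ a →
      (PySem.List.pyRange (a * n) ((a + k) * n) 1).map
          (fun i => (PySem.Int.floordiv i n, PySem.Int.mod i n))
        = (PySem.List.pyRange a (a + k) 1).flatMap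
            (fun a0 => (PySem.List.pyRange 0 n 1).map (fun a1 => (a0, a1))) := by
  intro k
  induction k with
  | zero =>
    intro a _
    simp only [Nat.cast_zero, add_zero]
    rw [PySem.List.pyRange_one_eq_nil (le_refl (a * n)), PySem.List.pyRange_one_eq_nil (le_refl a)]
    simp
  | succ k ih =>
    intro a ha
    have hk0 : (0 : Int) ≤ (k : Int) := Int.natCast_nonneg k
    have hsplit : PySem.List.pyRange (a * n) ((a + (k + 1 : Nat)) * n) 1
        = PySem.List.pyRange (a * n) (a * n + n) 1 ++ PySem.List.pyRange (a * n + n) ((a + (k + 1 : Nat)) * n) 1 :=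
      PySem.List.pyRange_one_append _ _ _ (by linarith) (by push_cast; nlinarith)
    have hup : ((a + (k + 1 : Nat)) : Int) * n = ((a + 1) + (k : Nat)) * n := by push_cast; ring
    have hlo : a * n + n = (a + 1) * n := by ring
    have hcons : PySem.List.pyRange a (a + (k + 1 : Nat)) 1 = a :: PySem.List.pyRange (a + 1) ((a + 1) + (k : Nat)) 1 := by
      rw [PySem.List.pyRange_one_cons (by push_cast; omega)]
      congr 1
      push_cast
      ring
    rw [hsplit, List.map_append, block_map n a hn, hcons, List.flatMap_cons]
    congr 1
    rw [hup, hlo]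
    exact ih (a + 1) (by omega)

-- first segment of B's flat range: indices below n decode to row 0
theorem seg_zero (n : Int) (hn : 0 < n) :
    (PySem.List.pyRange 1 n 1).map (fun i => (PySem.Int.floordiv i n, PySem.Int.mod i n))
      = (PySem.List.pyRange 1 n 1).map (fun a1 => ((0 : Int), a1)) := by
  apply List.map_congr_left
  intro i hi
  have h := (PySem.List.mem_pyRange_one).mp hi
  rw [PySem.Int.floordiv_eq_ediv_of_pos hn, PySem.Int.mod_eq_emod_of_pos hn,
      Int.ediv_eq_zero_of_lt (by omega) h.2, Int.emod_eq_of_lt (by omega) h.2]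

-- ===== VERDICT (by name: the statement is the Claim_ definition above) =====
theorem candidate_pairs_py_spec : Claim_equal_candidate_pairs_py := by
  intro actions _
  unfold Spec_candidate_pairs_py candidate_pairs_py candidate_pairs_py_alt
  by_cases hle : actions ≤ 0
  · rw [if_pos hle, PySem.List.pyRange_one_eq_nil hle]
    rfl
  · rw [if_neg hle]
    have hn : 0 < actions := by omega
    rw [nested_foldl]
    simp only [List.nil_append]
    rw [PySem.List.pyRange_one_cons hn]
    simp only [zero_add, List.flatMap_cons]
    simp only [decide_true, Bool.true_and]
    rw [row_zero actions, flatMap_congr_mem _ _ _ (row_pos actions)]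
    have hsq : actions ≤ actions * actions := by nlinarith
    rw [PySem.List.pyRange_one_append 1 actions (actions * actions) (by omega) hsq,
        List.map_append, seg_zero actions hn]
    congr 1
    have h := rows_map actions hn (actions - 1).toNat 1 (le_refl 1)
    have e : (1 + (((actions - 1).toNat : Nat) : Int)) = actions := by omega
    rw [e, one_mul] at h
    simp only [PySem.List.pyRange_one_cons hn, zero_add] at h
    exact h.symm
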